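-- pv_equiv track=rewrite | github.com/verbivoyeurista/cfe-eval-engine | pipeline/compare.py | derive_system_says
-- ===== SOURCE A (Python) =====
-- def derive_system_says(factor_id: str, factor_def: dict, raw_requirements: list) -> str:
--     """
--     Determine what the system said about a factor by checking
--     whether requirements in the matching category were applied.
--     """
--     sys_cat = factor_def.get("system_category", "")
--     if not sys_cat:
--         return "NOT_EVALUATED"
--
--     matching_reqs = [r for r in raw_requirements
--                      if sys_cat in (r.get("category") or "")]
--
--     if not matching_reqs:
--         return "NOT_EVALUATED"
--
--     applied = [r for r in matching_reqs
--                if (r.get("applicability") or "").upper() not in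
--                ("OUT_OF_SCOPE_BY_DTS", "OUT_OF_SCOPE")]
--
--     if applied:
--         return "IN_SCOPE"
--     else:
--         return "OUT_OF_SCOPE"
-- ===== SOURCE B (Python) =====
-- def derive_system_says(factor_id: str, factor_def: dict, raw_requirements: list) -> str:
--     """Rank-and-reduce: score each requirement 0/1/2 (non-matching /
--     out-of-scope match / applied match), take the maximum score, and map
--     it to the verdict through a table."""
--     sys_cat = factor_def.get("system_category", "")
--     if not sys_cat:
--         return "NOT_EVALUATED"
--
--     def score(r):
--         if sys_cat not in (r.get("category") or ""):
--             return 0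
--         if (r.get("applicability") or "").upper() in ("OUT_OF_SCOPE_BY_DTS", "OUT_OF_SCOPE"):
--             return 1
--         return 2
--
--     best = max(map(score, raw_requirements), default=0)
--     return ("NOT_EVALUATED", "OUT_OF_SCOPE", "IN_SCOPE")[best]
-- ===== Notes on version B (the rewrite author's own statement) =====
-- stated objective: alternative
-- what changed: Replaces A's two staged filtered-list passes with a rank-and-reduce scheme: each requirement is scored 0/1/2 (non-matching / out-of-scope match / applied match), the maximum score over the list is taken, and a table maps that score to the verdict.
import Mathlib
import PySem

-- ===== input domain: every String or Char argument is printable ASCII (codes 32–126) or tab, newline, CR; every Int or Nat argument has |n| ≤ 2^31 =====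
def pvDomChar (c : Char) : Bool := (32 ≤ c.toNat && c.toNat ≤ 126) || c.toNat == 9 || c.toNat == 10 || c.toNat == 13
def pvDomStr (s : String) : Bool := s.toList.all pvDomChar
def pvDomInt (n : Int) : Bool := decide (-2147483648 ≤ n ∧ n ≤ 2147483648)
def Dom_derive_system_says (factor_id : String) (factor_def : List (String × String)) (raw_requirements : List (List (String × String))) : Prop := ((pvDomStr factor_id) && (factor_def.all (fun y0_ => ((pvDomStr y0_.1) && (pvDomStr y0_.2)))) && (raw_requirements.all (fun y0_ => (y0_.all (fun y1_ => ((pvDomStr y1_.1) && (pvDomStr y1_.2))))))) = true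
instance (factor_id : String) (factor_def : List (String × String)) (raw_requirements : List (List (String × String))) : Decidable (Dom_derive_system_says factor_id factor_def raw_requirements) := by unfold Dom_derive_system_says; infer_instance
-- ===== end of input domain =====

-- B replaces A's two staged filtered-list passes with a rank-and-reduce scheme: each requirement is scored 0/1/2 (non-matching / out-of-scope match / applied match), the maximum score is taken, and a table maps it to the verdict; objective: alternative (same cost).


-- ===== PORT A =====
def pvIsOOS (r : List (String × String)) : Bool :=
  PySem.Str.upper ((PySem.Dict.mk r).getD "applicability" "") == "OUT_OF_SCOPE_BY_DTS" ||
  PySem.Str.upper ((PySem.Dict.mk r).getD "applicability" "") == "OUT_OF_SCOPE"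

def derive_system_says (factor_id : String) (factor_def : List (String × String)) (raw_requirements : List (List (String × String))) : String :=
  let sys_cat := (PySem.Dict.mk factor_def).getD "system_category" ""
  if sys_cat = "" then "NOT_EVALUATED"
  else
    let matching_reqs := raw_requirements.filter
      (fun r => PySem.Str.isIn sys_cat ((PySem.Dict.mk r).getD "category" ""))
    if matching_reqs = [] then "NOT_EVALUATED"
    else
      let applied := matching_reqs.filter (fun r => !pvIsOOS r)
      if applied ≠ [] then "IN_SCOPE" else "OUT_OF_SCOPE"

-- ===== PORT B =====
-- Source B's inner `score`: 0 = non-matching, 1 = matching but out of scope, 2 = applied match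
def pvScore (sys_cat : String) (r : List (String × String)) : Nat :=
  if !PySem.Str.isIn sys_cat ((PySem.Dict.mk r).getD "category" "") then 0
  else if pvIsOOS r then 1 else 2

def derive_system_says_alt (factor_id : String) (factor_def : List (String × String)) (raw_requirements : List (List (String × String))) : String :=
  let sys_cat := (PySem.Dict.mk factor_def).getD "system_category" ""
  if sys_cat = "" then "NOT_EVALUATED"
  else
    -- max(map(score, raw_requirements), default=0)
    let best := (raw_requirements.map (pvScore sys_cat)).foldl max 0
    -- tuple indexing ("NOT_EVALUATED","OUT_OF_SCOPE","IN_SCOPE")[best]; best ∈ {0,1,2} so always in range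
    (["NOT_EVALUATED", "OUT_OF_SCOPE", "IN_SCOPE"] : List String).getD best ""

-- ===== PRECONDITION & SPEC =====
def Spec_derive_system_says (factor_id : String) (factor_def : List (String × String)) (raw_requirements : List (List (String × String))) (out : String) : Prop := out = derive_system_says_alt factor_id factor_def raw_requirements
instance (factor_id : String) (factor_def : List (String × String)) (raw_requirements : List (List (String × String))) (out : String) : Decidable (Spec_derive_system_says factor_id factor_def raw_requirements out) := by unfold Spec_derive_system_says; infer_instance

-- ===== CLAIM (what is proved, stated in full; the proofs are below) =====
def Claim_equal_derive_system_says : Prop := ∀ (factor_id : String) (factor_def : List (String × String)) (raw_requirements : List (List (String × String))), Dom_derive_system_says factor_id factor_def raw_requirements → Spec_derive_system_says factor_id factor_def raw_requirements (derive_system_says factor_id factor_def raw_requirements)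

-- ===== LEMMAS AND PROOFS =====

theorem pvMaxFold (l : List Nat) (a : Nat) :
    l.foldl max a = max a (l.foldl max 0) := by
  induction l generalizing a with
  | nil => simp
  | cons x t ih =>
    simp only [List.foldl_cons]
    rw [ih (max a x), ih (max 0 x)]
    omega

-- the fold of max over the scores, abstractly: p = "matches", q = "out of scope"
theorem pvBestFold {α : Type} (p q : α → Bool) (l : List α) :
    (l.map (fun r => if !p r then (0:Nat) else if q r then 1 else 2)).foldl max 0
    = (if l.any (fun r => p r && !q r) then 2 else if l.any p then 1 else 0) := by
  induction l with
  | nil => simp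
  | cons r t ih =>
    simp only [List.map_cons, List.foldl_cons, List.any_cons]
    rw [pvMaxFold, ih]
    rcases Bool.eq_false_or_eq_true (p r) with hpr | hpr <;>
      rcases Bool.eq_false_or_eq_true (q r) with hqr | hqr <;>
      rcases Bool.eq_false_or_eq_true (t.any (fun x => p x && !q x)) with cq | cq <;>
      rcases Bool.eq_false_or_eq_true (t.any p) with cp | cp <;>
      simp only [hpr, hqr, cq, cp] <;> simp

-- specialisation to B's score function (pvScore sc is definitionally the lambda above)
theorem pvBest_spec (sc : String) (l : List (List (String × String))) :
    (l.map (pvScore sc)).foldl max 0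
    = (if l.any (fun r => PySem.Str.isIn sc ((PySem.Dict.mk r).getD "category" "") && !pvIsOOS r) then 2
       else if l.any (fun r => PySem.Str.isIn sc ((PySem.Dict.mk r).getD "category" "")) then 1
       else 0) :=
  pvBestFold (fun r => PySem.Str.isIn sc ((PySem.Dict.mk r).getD "category" "")) pvIsOOS l

theorem pvFilter_nil_iff {α : Type} (p : α → Bool) (l : List α) :
    l.filter p = [] ↔ l.any p = false := by
  simp [List.filter_eq_nil_iff, List.any_eq_false]

theorem derive_system_says_spec : Claim_equal_derive_system_says := by
  unfold Claim_equal_derive_system_says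
  intro factor_id factor_def raw_requirements _
  unfold Spec_derive_system_says derive_system_says derive_system_says_alt
  set sc := (PySem.Dict.mk factor_def).getD "system_category" "" with hsc
  set p : List (String × String) → Bool :=
    fun r => PySem.Str.isIn sc ((PySem.Dict.mk r).getD "category" "") with hp
  by_cases h0 : sc = ""
  · rw [if_pos h0, if_pos h0]
  · rw [if_neg h0, if_neg h0, pvBest_spec]
    simp only [← hp]
    have f2 : ((raw_requirements.filter p).filter (fun r => !pvIsOOS r) = [])
        ↔ raw_requirements.any (fun r => p r && !pvIsOOS r) = false := by
      rw [List.filter_filter, pvFilter_nil_iff]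
      constructor <;> intro h <;> rw [List.any_eq_false] at h ⊢ <;>
        intro r hr <;> have := h r hr <;> simp_all [Bool.and_comm]
    cases h1 : raw_requirements.any p with
    | false =>
      have hq : raw_requirements.any (fun r => p r && !pvIsOOS r) = false := by
        rw [List.any_eq_false] at h1 ⊢
        intro r hr
        simp [h1 r hr]
      rw [if_pos ((pvFilter_nil_iff p _).mpr h1), hq]
      rfl
    | true =>
      have hne : raw_requirements.filter p ≠ [] := by
        intro hnil; rw [pvFilter_nil_iff, h1] at hnil; simp at hnil
      rw [if_neg hne]
      cases h2 : raw_requirements.any (fun r => p r && !pvIsOOS r) with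
      | false =>
        rw [if_neg (not_not_intro (f2.mpr h2))]
        rfl
      | true =>
        have hne2 : (raw_requirements.filter p).filter (fun r => !pvIsOOS r) ≠ [] := by
          intro hnil; rw [f2, h2] at hnil; simp at hnil
        rw [if_pos hne2]
        rfl
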